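-- pv_equiv track=rewrite | github.com/Adanato/Arete | src/arete/interface/cli.py | _merge_split_cards
-- ===== SOURCE A (Python) =====
-- from typing import Annotated, Any
--
-- def _merge_split_cards(cards: list[Any]) -> list[Any]:
--     """Merge cards that were accidentally split into two list items.
--
--     Recombine Front and Back into one card if possible.
--     """
--     if not cards or len(cards) < 2:
--         return cards
--
--     new_cards = []
--     i = 0
--     while i < len(cards):
--         curr = cards[i]
--
--         # Look ahead for a potential split partner
--         if i + 1 < len(cards):
--             nxt = cards[i + 1]
--             if isinstance(curr, dict) and isinstance(nxt, dict):
--                 has_front = any(k in curr for k in ("Front", "front", "Text", "text"))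
--                 has_back = any(k in curr for k in ("Back", "back", "Extra", "extra"))
--                 next_has_front = any(k in nxt for k in ("Front", "front", "Text", "text"))
--                 next_has_back = any(k in nxt for k in ("Back", "back", "Extra", "extra"))
--
--                 # Case: Current has Front, next has Back (Standard split)
--                 if has_front and not has_back and next_has_back and not next_has_front:
--                     # Merge them!
--                     merged = {**curr, **nxt}
--                     new_cards.append(merged)
--                     i += 2
--                     continue
--
--         new_cards.append(curr)
--         i += 1
--
--     return new_cards
-- ===== SOURCE B (Python) =====
-- FRONT_KEYS = ("Front", "front", "Text", "text")
-- BACK_KEYS = ("Back", "back", "Extra", "extra")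
--
--
-- def _is_front_only(card):
--     return (isinstance(card, dict)
--             and any(k in card for k in FRONT_KEYS)
--             and not any(k in card for k in BACK_KEYS))
--
--
-- def _is_back_only(card):
--     return (isinstance(card, dict)
--             and any(k in card for k in BACK_KEYS)
--             and not any(k in card for k in FRONT_KEYS))
--
--
-- def _merge_split_cards(cards):
--     """Merge cards that were accidentally split into two list items.
--
--     Single fold over the cards: merge a back-only card into a
--     front-only card sitting at the tail of the result.
--     """
--     if not cards or len(cards) < 2:
--         return cards
--
--     result = []
--     for curr in cards:
--         if result and _is_front_only(result[-1]) and _is_back_only(curr):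
--             result[-1] = {**result[-1], **curr}
--         else:
--             result.append(curr)
--     return result
-- ===== Notes on version B (the rewrite author's own statement) =====
-- stated objective: alternative
-- what changed: Replaced the index-skipping look-ahead while-loop (peek at cards[i+1], i += 2 on merge) by a single fold that appends each card and, when the accumulator's tail is front-only and the current card back-only, replaces the tail with the merged dict.
import Mathlib
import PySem

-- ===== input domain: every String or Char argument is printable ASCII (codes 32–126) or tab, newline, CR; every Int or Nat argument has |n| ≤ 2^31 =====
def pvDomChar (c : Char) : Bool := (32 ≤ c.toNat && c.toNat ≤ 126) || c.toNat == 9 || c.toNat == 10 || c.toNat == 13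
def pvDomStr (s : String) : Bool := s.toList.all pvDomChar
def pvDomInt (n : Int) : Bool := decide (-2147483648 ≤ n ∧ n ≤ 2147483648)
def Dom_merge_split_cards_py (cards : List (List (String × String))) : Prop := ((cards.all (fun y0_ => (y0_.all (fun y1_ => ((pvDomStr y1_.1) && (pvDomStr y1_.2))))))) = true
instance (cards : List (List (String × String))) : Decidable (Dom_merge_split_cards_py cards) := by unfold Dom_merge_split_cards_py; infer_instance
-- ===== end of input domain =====

-- B replaces A's index-skipping look-ahead while-loop by a single fold that merges a
-- back-only card into a front-only card at the tail of the accumulator (objective: alternative decomposition).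
-- All list elements are dicts here, so A's `isinstance(..., dict)` checks are always true.

-- ===== PORT A =====
-- shared helpers: Python `any(k in d for k in (...))` and `{**c, **n}`
def pvHasFront (d : List (String × String)) : Bool :=
  (["Front", "front", "Text", "text"]).any (fun k => (PySem.Dict.mk d).contains k)

def pvHasBack (d : List (String × String)) : Bool :=
  (["Back", "back", "Extra", "extra"]).any (fun k => (PySem.Dict.mk d).contains k)

def pvMerge (c n : List (String × String)) : List (String × String) :=
  ((PySem.Dict.mk c).update n).items

-- the while-loop of A: `remaining` is cards[i:], `new_cards` the output accumulator
def pvMergeLoopA (remaining new_cards : List (List (String × String))) :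
    List (List (String × String)) :=
  match remaining with
  | [] => new_cards
  | curr :: nxt :: rest' =>
      if pvHasFront curr && !pvHasBack curr && pvHasBack nxt && !pvHasFront nxt then
        pvMergeLoopA rest' (new_cards ++ [pvMerge curr nxt])
      else
        pvMergeLoopA (nxt :: rest') (new_cards ++ [curr])
  | [curr] => pvMergeLoopA [] (new_cards ++ [curr])

def merge_split_cards_py (cards : List (List (String × String))) : List (List (String × String)) :=
  if cards.length < 2 then cards else pvMergeLoopA cards []

-- ===== PORT B =====
def pvIsFrontOnly (d : List (String × String)) : Bool := pvHasFront d && !pvHasBack d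

def pvIsBackOnly (d : List (String × String)) : Bool := pvHasBack d && !pvHasFront d

-- one step of B's fold: merge into the tail of `result`, else append
def pvStepB (result : List (List (String × String))) (curr : List (String × String)) :
    List (List (String × String)) :=
  match result.getLast? with
  | some last =>
    if pvIsFrontOnly last && pvIsBackOnly curr then
      result.dropLast ++ [pvMerge last curr]
    else result ++ [curr]
  | none => result ++ [curr]

def merge_split_cards_py_alt (cards : List (List (String × String))) : List (List (String × String)) :=
  if cards.length < 2 then cards else cards.foldl pvStepB []

-- ===== PRECONDITION & SPEC =====
def Spec_merge_split_cards_py (cards : List (List (String × String))) (out : List (List (String × String))) : Prop := out = merge_split_cards_py_alt cards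
instance (cards : List (List (String × String))) (out : List (List (String × String))) : Decidable (Spec_merge_split_cards_py cards out) := by unfold Spec_merge_split_cards_py; infer_instance

-- ===== CLAIM (what is proved, stated in full; the proofs are below) =====
def Claim_equal_merge_split_cards_py : Prop := ∀ (cards : List (List (String × String))), Dom_merge_split_cards_py cards → Spec_merge_split_cards_py cards (merge_split_cards_py cards)

-- ===== LEMMAS AND PROOFS =====

-- merging a back-carrying dict keeps a back key, so a merged card is never front-only
theorem pvHasBack_merge (c n : List (String × String)) (h : pvHasBack n = true) :
    pvHasBack (pvMerge c n) = true := by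
  simp only [pvHasBack, pvMerge, List.any_eq_true] at h ⊢
  obtain ⟨k, hk, hc⟩ := h
  refine ⟨k, hk, ?_⟩
  rw [PySem.Dict.contains_iff_mem_keys] at hc ⊢
  rw [show (PySem.Dict.mk (((PySem.Dict.mk c).update n).items)) = (PySem.Dict.mk c).update n from rfl]
  rw [PySem.Dict.update, PySem.Dict.keys_foldl_insert_key n Prod.fst (fun _ p => p.2)]
  rw [PySem.Set.mem_update]
  right
  simpa [PySem.Dict.keys] using hc

theorem pvIsFrontOnly_merge (c n : List (String × String)) (h : pvIsBackOnly n = true) :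
    pvIsFrontOnly (pvMerge c n) = false := by
  have hb : pvHasBack n = true := by
    simp only [pvIsBackOnly, Bool.and_eq_true] at h; exact h.1
  simp [pvIsFrontOnly, pvHasBack_merge c n hb]

-- when the condition on the accumulator's tail fails, B's step is a plain append
theorem pvStepB_append (acc : List (List (String × String))) (c : List (String × String))
    (h : ∀ la, acc.getLast? = some la → ¬(pvIsFrontOnly la = true ∧ pvIsBackOnly c = true)) :
    pvStepB acc c = acc ++ [c] := by
  unfold pvStepB
  cases hl : acc.getLast? with
  | none => rfl
  | some la =>
    have := h la hl
    have : (pvIsFrontOnly la && pvIsBackOnly c) = false := by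
      cases hf : pvIsFrontOnly la <;> cases hb : pvIsBackOnly c <;> simp_all
    simp [this]

-- core: B's fold over any safe accumulator computes A's loop
theorem pvLoop_eq : ∀ (fuel : ℕ) (l : List (List (String × String))), l.length ≤ fuel →
    ∀ (acc : List (List (String × String))),
    (∀ la, acc.getLast? = some la → ∀ c, l.head? = some c →
        ¬(pvIsFrontOnly la = true ∧ pvIsBackOnly c = true)) →
    l.foldl pvStepB acc = pvMergeLoopA l acc := by
  intro fuel
  induction fuel with
  | zero =>
    intro l hl acc _
    have : l = [] := by cases l <;> simp_all
    subst this; rfl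
  | succ n ih =>
    intro l hl acc H
    match l with
    | [] => rfl
    | curr :: rest =>
      have hstep : pvStepB acc curr = acc ++ [curr] := by
        apply pvStepB_append
        intro la hla
        exact H la hla curr rfl
      match rest with
      | [] =>
        simp only [List.foldl_cons, List.foldl_nil, hstep, pvMergeLoopA]
      | nxt :: rest' =>
        have hstep1 : List.foldl pvStepB acc (curr :: nxt :: rest')
            = List.foldl pvStepB (acc ++ [curr]) (nxt :: rest') := by
          rw [List.foldl_cons, hstep]
        by_cases hc : (pvHasFront curr && !pvHasBack curr && pvHasBack nxt && !pvHasFront nxt) = true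
        · -- merge case
          have hfo : pvIsFrontOnly curr = true := by
            simp only [Bool.and_eq_true] at hc
            simp [pvIsFrontOnly, hc.1.1.1, hc.1.1.2]
          have hbo : pvIsBackOnly nxt = true := by
            simp only [Bool.and_eq_true] at hc
            simp [pvIsBackOnly, hc.1.2, hc.2]
          have hstep2 : pvStepB (acc ++ [curr]) nxt = acc ++ [pvMerge curr nxt] := by
            unfold pvStepB
            rw [List.getLast?_concat]
            simp [hfo, hbo]
          rw [hstep1, List.foldl_cons, hstep2,
            ih rest' (by simp at hl ⊢; omega) (acc ++ [pvMerge curr nxt]) ?_]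
          · conv_rhs => rw [pvMergeLoopA]
            rw [if_pos hc]
          · intro la hla c _ hcond
            rw [List.getLast?_concat] at hla
            cases hla
            exact absurd hcond.1 (by simp [pvIsFrontOnly_merge curr nxt hbo])
        · -- no merge: append curr, recurse on nxt :: rest'
          rw [hstep1, ih (nxt :: rest') (by simp at hl ⊢; omega) (acc ++ [curr]) ?_]
          · conv_rhs => rw [pvMergeLoopA]
            rw [if_neg hc]
          · intro la hla c hc' hcond
            rw [List.getLast?_concat] at hla
            cases hla
            simp only [List.head?_cons, Option.some.injEq] at hc'
            subst hc'
            exact hc (by simp only [pvIsFrontOnly, pvIsBackOnly, Bool.and_eq_true, Bool.not_eq_eq_eq_not, Bool.not_true] at hcond; simp [hcond.1.1, hcond.1.2, hcond.2.1, hcond.2.2])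

-- ===== VERDICT (by name: the statement is the Claim_ definition above) =====
theorem merge_split_cards_py_spec : Claim_equal_merge_split_cards_py := by
  intro cards _
  unfold Spec_merge_split_cards_py merge_split_cards_py merge_split_cards_py_alt
  by_cases h : cards.length < 2
  · simp [h]
  · simp only [h, if_false]
    exact (pvLoop_eq cards.length cards le_rfl [] (by intro la hla; simp at hla)).symm
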